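-- pv_equiv track=rewrite | github.com/vwvwbg/parse-healer | skills/wcl-timeline/scripts/wcl_timeline.py | parse_spell_filters
-- ===== SOURCE A (Python) =====
-- def parse_spell_filters(spell_input: str):
--     """解析使用者輸入的技能篩選條件，支援技能名稱或 spell ID，逗號分隔。
--
--     回傳: (name_set, id_set) — 分別是要匹配的名稱集合和 ID 集合。
--     """
--     names = set()
--     ids = set()
--     # 先用逗號分隔，但要處理技能名中可能含逗號的情況（如 "Invoke Yu'lon, the Jade Serpent"）
--     # 策略：先嘗試以數字 ID 分割，剩下的作為名稱匹配
--     parts = [p.strip() for p in spell_input.split(",") if p.strip()]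
--
--     i = 0
--     while i < len(parts):
--         part = parts[i]
--         # 純數字 → spell ID
--         if part.isdigit():
--             ids.add(int(part))
--             i += 1
--         else:
--             # 嘗試貪婪匹配：往後合併直到找到下一個純數字或結尾
--             combined = part
--             j = i + 1
--             while j < len(parts) and not parts[j].isdigit():
--                 # 檢查合併後是否更像一個完整技能名
--                 combined = combined + ", " + parts[j]
--                 j += 1
--             # 如果原始 part 本身看起來就是個合理的技能名，優先用短的
--             # 但如果下一個 part 開頭是小寫（如 "the Jade Serpent"），合併
--             final_name = part
--             k = i + 1
--             while k < len(parts) and not parts[k].isdigit():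
--                 next_part = parts[k]
--                 if next_part and next_part[0].islower():
--                     final_name = final_name + ", " + next_part
--                     k += 1
--                 else:
--                     break
--             names.add(final_name.lower())
--             i = k
--     return names, ids
-- ===== SOURCE B (Python) =====
-- def parse_spell_filters(spell_input: str):
--     """Single forward pass with one pending-name accumulator; no index jumping."""
--     names = set()
--     ids = set()
--     current = None
--     for part in spell_input.split(","):
--         part = part.strip()
--         if not part:
--             continue
--         if part.isdigit():
--             if current is not None:
--                 names.add(current.lower())
--                 current = None
--             ids.add(int(part))
--         elif current is None:
--             current = part
--         elif part[0].islower():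
--             current = current + ", " + part
--         else:
--             names.add(current.lower())
--             current = part
--     if current is not None:
--         names.add(current.lower())
--     return names, ids
-- ===== Notes on version B (the rewrite author's own statement) =====
-- stated objective: simpler
-- what changed: Replaced A's index-jumping outer while-loop with its dead greedy look-ahead scan and second lowercase look-ahead scan by a single forward pass over the split parts that keeps one pending-name accumulator and flushes it once at the end.
import Mathlib
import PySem

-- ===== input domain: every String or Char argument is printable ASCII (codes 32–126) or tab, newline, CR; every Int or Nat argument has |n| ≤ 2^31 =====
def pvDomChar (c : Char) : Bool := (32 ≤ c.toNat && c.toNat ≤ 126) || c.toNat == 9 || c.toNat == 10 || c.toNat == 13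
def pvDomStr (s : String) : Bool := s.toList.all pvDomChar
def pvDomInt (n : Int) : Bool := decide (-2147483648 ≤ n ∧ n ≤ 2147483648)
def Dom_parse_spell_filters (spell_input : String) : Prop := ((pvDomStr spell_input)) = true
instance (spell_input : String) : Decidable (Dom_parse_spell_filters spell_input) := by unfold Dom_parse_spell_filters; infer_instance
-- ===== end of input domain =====

-- B replaces A's index-jumping outer loop with nested look-ahead scans by a single
-- forward pass keeping one pending-name accumulator (objective: simpler).

-- part and part[0].islower() (Python truthiness of the string, then the first char)
def pvFirstLower (s : String) : Bool :=
  match PySem.Str.pyGet? s 0 with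
  | some c => PySem.Chars.islower c
  | none => false

-- ===== PORT A =====
-- inner 'combined/j' while-loop (its result is never used, as in A)
def pvJLoopA (combined : String) : List String → String
  | [] => combined
  | p :: r =>
    if PySem.Str.strIsdigit p then combined
    else pvJLoopA (combined ++ ", " ++ p) r

-- inner 'final_name/k' while-loop: returns (final_name, remaining parts at index k)
def pvKLoopA (final : String) : List String → String × List String
  | [] => (final, [])
  | p :: r =>
    if PySem.Str.strIsdigit p then (final, p :: r)
    else if (p != "") && pvFirstLower p then pvKLoopA (final ++ ", " ++ p) r
    else (final, p :: r)

theorem pvKLoopA_len (final : String) (l : List String) :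
    (pvKLoopA final l).2.length ≤ l.length := by
  induction l generalizing final with
  | nil => simp [pvKLoopA]
  | cons p r ih =>
    simp only [pvKLoopA]
    split
    · simp
    · split
      · exact le_trans (ih _) (by simp)
      · simp

-- outer 'while i < len(parts)' loop
def pvLoopA (names : PySem.Set String) (ids : PySem.Set Int) :
    List String → List String × List Int
  | [] => (names, ids)
  | part :: rest =>
    if PySem.Str.strIsdigit part then
      pvLoopA names (PySem.Set.add ids ((PySem.Int.ofStr? part).getD 0)) rest
    else
      let _combined := pvJLoopA part rest
      let fr := pvKLoopA part rest
      pvLoopA (PySem.Set.add names (PySem.Str.lower fr.1)) ids fr.2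
  termination_by l => l.length
  decreasing_by
  · simp
  · exact Nat.lt_succ_of_le (pvKLoopA_len _ _)

def parse_spell_filters (spell_input : String) : List String × List Int :=
  let parts := (((PySem.Str.split? spell_input ",").getD []).filter
      (fun p => PySem.Str.strip p != "")).map PySem.Str.strip
  pvLoopA PySem.Set.empty PySem.Set.empty parts

-- ===== PORT B =====
-- the body of B's single 'for part in spell_input.split(",")' loop
def pvStepB (acc : PySem.Set String × PySem.Set Int × Option String) (rawPart : String) :
    PySem.Set String × PySem.Set Int × Option String :=
  let part := PySem.Str.strip rawPart
  if part == "" then acc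
  else
    match acc with
    | (names, ids, cur) =>
      if PySem.Str.strIsdigit part then
        match cur with
        | some c => (PySem.Set.add names (PySem.Str.lower c),
                     PySem.Set.add ids ((PySem.Int.ofStr? part).getD 0), none)
        | none => (names, PySem.Set.add ids ((PySem.Int.ofStr? part).getD 0), none)
      else
        match cur with
        | none => (names, ids, some part)
        | some c =>
          if pvFirstLower part then (names, ids, some (c ++ ", " ++ part))
          else (PySem.Set.add names (PySem.Str.lower c), ids, some part)

def parse_spell_filters_alt (spell_input : String) : List String × List Int :=
  match ((PySem.Str.split? spell_input ",").getD []).foldl pvStepB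
      (PySem.Set.empty, PySem.Set.empty, none) with
  | (names, ids, some c) => (PySem.Set.add names (PySem.Str.lower c), ids)
  | (names, ids, none) => (names, ids)

-- ===== PRECONDITION & SPEC =====
def Spec_parse_spell_filters (spell_input : String) (out : List String × List Int) : Prop :=
  out = parse_spell_filters_alt spell_input
instance (spell_input : String) (out : List String × List Int) :
    Decidable (Spec_parse_spell_filters spell_input out) := by
  unfold Spec_parse_spell_filters; infer_instance

-- ===== CLAIM (what is proved, stated in full; the proofs are below) =====
def Claim_equal_parse_spell_filters : Prop :=
  ∀ (spell_input : String), Dom_parse_spell_filters spell_input →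
    Spec_parse_spell_filters spell_input (parse_spell_filters spell_input)

-- ===== LEMMAS AND PROOFS =====

-- B's loop body on an already-stripped nonempty part
def pvStepB' (acc : PySem.Set String × PySem.Set Int × Option String) (part : String) :
    PySem.Set String × PySem.Set Int × Option String :=
  match acc with
  | (names, ids, cur) =>
    if PySem.Str.strIsdigit part then
      match cur with
      | some c => (PySem.Set.add names (PySem.Str.lower c),
                   PySem.Set.add ids ((PySem.Int.ofStr? part).getD 0), none)
      | none => (names, PySem.Set.add ids ((PySem.Int.ofStr? part).getD 0), none)
    else
      match cur with
      | none => (names, ids, some part)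
      | some c =>
        if pvFirstLower part then (names, ids, some (c ++ ", " ++ part))
        else (PySem.Set.add names (PySem.Str.lower c), ids, some part)

-- the post-loop flush
def pvFinishB : PySem.Set String × PySem.Set Int × Option String → List String × List Int
  | (names, ids, some c) => (PySem.Set.add names (PySem.Str.lower c), ids)
  | (names, ids, none) => (names, ids)

theorem pvStepB_eq (acc : PySem.Set String × PySem.Set Int × Option String) (rp : String) :
    pvStepB acc rp =
      if PySem.Str.strip rp == "" then acc else pvStepB' acc (PySem.Str.strip rp) := by
  cases acc with
  | mk names rest => cases rest with
    | mk ids cur => simp only [pvStepB, pvStepB']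

theorem pvFoldB_strip (raw : List String)
    (init : PySem.Set String × PySem.Set Int × Option String) :
    raw.foldl pvStepB init =
      ((raw.filter (fun p => PySem.Str.strip p != "")).map PySem.Str.strip).foldl
        pvStepB' init := by
  induction raw generalizing init with
  | nil => rfl
  | cons rp r ih =>
    simp only [List.filter_cons]
    by_cases h : PySem.Str.strip rp = ""
    · have : (PySem.Str.strip rp != "") = false := by simp [h]
      rw [this]
      simp only [List.foldl_cons, pvStepB_eq, h, beq_self_eq_true]
      simpa using ih init
    · have hb : (PySem.Str.strip rp != "") = true := by simp [h]
      rw [hb]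
      simp only [List.foldl_cons, pvStepB_eq]
      rw [if_neg (by simpa using h)]
      exact ih _

-- the main correspondence between A's jumping loop and B's single pass, as a
-- mutual invariant on the (all-nonempty) stripped parts list
theorem pvMain (l : List String) (h : ∀ p ∈ l, p ≠ "") :
    (∀ names ids, pvLoopA names ids l = pvFinishB (l.foldl pvStepB' (names, ids, none)))
    ∧ (∀ names ids cur,
        pvFinishB (l.foldl pvStepB' (names, ids, some cur) ) =
          pvLoopA (PySem.Set.add names (PySem.Str.lower (pvKLoopA cur l).1)) ids
            (pvKLoopA cur l).2) := by
  induction l with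
  | nil =>
    refine ⟨fun names ids => ?_, fun names ids cur => ?_⟩
    · simp [pvLoopA, pvFinishB]
    · simp [pvKLoopA, pvLoopA, pvFinishB]
  | cons p r ih =>
    have hp : p ≠ "" := h p (by simp)
    have hr : ∀ q ∈ r, q ≠ "" := fun q hq => h q (by simp [hq])
    obtain ⟨P, Q⟩ := ih hr
    by_cases hd : PySem.Str.strIsdigit p = true
    · refine ⟨fun names ids => ?_, fun names ids cur => ?_⟩
      · simp only [pvLoopA, hd, List.foldl_cons, pvStepB', if_true]
        exact P names _
      · simp only [List.foldl_cons, pvStepB', hd, if_true, pvKLoopA]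
        rw [← P]
        have hdc : PySem.Chars.strIsdigit p.toList = true := by simpa using hd
        simp [pvLoopA, hdc]
    · have hd' : PySem.Str.strIsdigit p = false := by simpa using hd
      refine ⟨fun names ids => ?_, fun names ids cur => ?_⟩
      · simp only [pvLoopA, hd', List.foldl_cons, pvStepB', Bool.false_eq_true, if_false]
        exact (Q names ids p).symm
      · have hpb : (p != "") = true := by simp [hp]
        by_cases hl : pvFirstLower p = true
        · simp only [List.foldl_cons, pvStepB', hd', Bool.false_eq_true, if_false, hl,
            if_true, pvKLoopA, hpb, Bool.true_and]
          exact Q names ids (cur ++ ", " ++ p)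
        · have hl' : pvFirstLower p = false := by simpa using hl
          simp only [List.foldl_cons, pvStepB', hd', hl', Bool.false_eq_true, if_false,
            pvKLoopA, hpb, Bool.true_and]
          rw [Q]
          simp only [pvLoopA, hd', Bool.false_eq_true, if_false]

-- ===== VERDICT (by name: the statement is the Claim_ definition above) =====
theorem parse_spell_filters_spec : Claim_equal_parse_spell_filters := by
  intro s _
  unfold Spec_parse_spell_filters parse_spell_filters parse_spell_filters_alt
  rw [pvFoldB_strip]
  have hne : ∀ p ∈ (((PySem.Str.split? s ",").getD []).filter
      (fun p => PySem.Str.strip p != "")).map PySem.Str.strip, p ≠ "" := by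
    intro p hp
    obtain ⟨q, hq, rfl⟩ := List.mem_map.mp hp
    have := List.of_mem_filter hq
    simpa using this
  rw [(pvMain _ hne).1 PySem.Set.empty PySem.Set.empty]
  rcases hres : ((((PySem.Str.split? s ",").getD []).filter (fun p => PySem.Str.strip p != "")).map
      PySem.Str.strip).foldl pvStepB' (PySem.Set.empty, PySem.Set.empty, none) with ⟨n, i, c⟩
  cases c <;> rfl
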